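-- pv_equiv track=rewrite | github.com/mdk44/AdventOfCode2015 | Day 19/Day 19.py | part_2
-- ===== SOURCE A (Python) =====
-- def part_2(inp):
--     num = 0
--     for i in range(0, len(inp)):
--         if inp[i].isupper():
--             num += 1
--     # The following numbers only appear on the right side, not the left
--     num -= inp.count('Rn')
--     num -= inp.count('Ar')
--     num -= (2*inp.count('Y')) # Related to the pattern in the input file and how removing Y also removes subsequent variables.  Had to google this.
--     num -= 1 # To get back to e
--     return num
-- ===== SOURCE B (Python) =====
-- def part_2(inp):
--     # One pass over the characters with the previous char as state,
--     # instead of an index loop plus three separate .count scans.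
--     num = -1
--     prev = ''
--     for c in inp:
--         if c.isupper():
--             num += 1
--         if c == 'Y':
--             num -= 2
--         if prev == 'R' and c == 'n':
--             num -= 1
--         if prev == 'A' and c == 'r':
--             num -= 1
--         prev = c
--     return num
-- ===== Notes on version B (the rewrite author's own statement) =====
-- stated objective: alternative
-- what changed: Replaces the index loop plus three separate substring .count scans with a single left-to-right pass that keeps the previous character as state and adjusts the total at each character.
import Mathlib
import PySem

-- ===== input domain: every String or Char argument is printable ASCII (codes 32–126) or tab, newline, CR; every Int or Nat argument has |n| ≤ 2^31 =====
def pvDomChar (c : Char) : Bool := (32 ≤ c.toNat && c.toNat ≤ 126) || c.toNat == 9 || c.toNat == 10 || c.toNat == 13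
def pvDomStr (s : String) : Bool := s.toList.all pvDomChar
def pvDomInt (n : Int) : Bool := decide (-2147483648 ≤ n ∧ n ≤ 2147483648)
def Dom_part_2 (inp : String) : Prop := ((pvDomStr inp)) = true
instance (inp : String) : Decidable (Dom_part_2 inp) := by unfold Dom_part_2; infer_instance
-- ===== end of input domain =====

-- B replaces A's index loop plus three separate substring-count scans with a single
-- left-to-right pass keeping the previous character as state (alternative decomposition).

-- ===== PORT A =====
def part_2 (inp : String) : Int :=
  let cs := inp.toList
  -- for i in range(0, len(inp)): if inp[i].isupper(): num += 1
  let num : Int := (PySem.List.pyRange 0 (PySem.List.len cs) 1).foldl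
    (fun n i => if PySem.Chars.isupper (PySem.List.pyGetD cs i ' ') then n + 1 else n) 0
  let num := num - (PySem.Str.count inp "Rn" : Int)
  let num := num - (PySem.Str.count inp "Ar" : Int)
  let num := num - 2 * (PySem.Str.count inp "Y" : Int)
  num - 1

-- ===== PORT B =====
-- step of B's single pass: state = (running total, previous character; none = '')
def pvStep (st : Int × Option Char) (c : Char) : Int × Option Char :=
  let n := st.1
  let n := if PySem.Chars.isupper c then n + 1 else n
  let n := if c = 'Y' then n - 2 else n
  let n := if st.2 = some 'R' ∧ c = 'n' then n - 1 else n
  let n := if st.2 = some 'A' ∧ c = 'r' then n - 1 else n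
  (n, some c)

def part_2_alt (inp : String) : Int :=
  (inp.toList.foldl pvStep (-1, none)).1

-- ===== PRECONDITION & SPEC =====
def Spec_part_2 (inp : String) (out : Int) : Prop := out = part_2_alt inp
instance (inp : String) (out : Int) : Decidable (Spec_part_2 inp out) := by unfold Spec_part_2; infer_instance

-- ===== CLAIM (what is proved, stated in full; the proofs are below) =====
def Claim_equal_part_2 : Prop := ∀ (inp : String), Dom_part_2 inp → Spec_part_2 inp (part_2 inp)

-- ===== LEMMAS AND PROOFS =====

-- number of adjacent (a, b) pairs in a list
def pvPairs (a b : Char) : List Char → Nat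
  | x :: y :: t => (if x = a ∧ y = b then 1 else 0) + pvPairs a b (y :: t)
  | _ => 0

theorem pvCountGo_pair (a b : Char) (hab : a ≠ b) :
    ∀ (fuel : Nat) (cs : List Char) (acc : Nat), cs.length ≤ fuel →
      PySem.Chars.count.go [a, b] fuel cs acc = acc + pvPairs a b cs := by
  intro fuel
  induction fuel with
  | zero =>
    intro cs acc h
    have : cs = [] := List.length_eq_zero_iff.mp (Nat.le_zero.mp h)
    subst this; simp [PySem.Chars.count.go, pvPairs]
  | succ f ih =>
    intro cs acc h
    match cs with
    | [] => simp [PySem.Chars.count.go, pvPairs]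
    | x :: t =>
      rw [PySem.Chars.count.go]
      by_cases hpre : [a, b].isPrefixOf (x :: t) = true
      · rw [if_pos hpre]
        obtain ⟨t', rfl, rfl⟩ : ∃ t', x = a ∧ t = b :: t' := by
          rcases t with _ | ⟨y, t'⟩
          · simp [List.isPrefixOf] at hpre
          · simp [List.isPrefixOf] at hpre
            exact ⟨t', hpre.1.symm, by rw [← hpre.2]⟩
        simp only [List.length_cons] at h
        have h2 : t'.length ≤ f := by omega
        rcases t' with _ | ⟨z, t''⟩
        · simp [List.drop, ih, pvPairs]
        · simp only [List.length, List.drop]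
          rw [ih (z :: t'') (acc + 1) (by simpa using h2)]
          simp [pvPairs, hab.symm]
          omega
      · rw [if_neg hpre]
        simp only [List.length_cons] at h
        rw [ih t acc (by omega)]
        rcases t with _ | ⟨y, t'⟩
        · simp [pvPairs]
        · have : ¬ (x = a ∧ y = b) := by
            intro ⟨h1, h2⟩; subst h1; subst h2
            simp [List.isPrefixOf] at hpre
          simp [pvPairs, this]

theorem pvCount_pair (a b : Char) (hab : a ≠ b) (cs : List Char) :
    PySem.Chars.count cs [a, b] = pvPairs a b cs := by
  rw [PySem.Chars.count]
  simp [pvCountGo_pair a b hab cs.length cs 0 (le_refl _)]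

theorem pvCountGo_single (y : Char) :
    ∀ (fuel : Nat) (cs : List Char) (acc : Nat), cs.length ≤ fuel →
      PySem.Chars.count.go [y] fuel cs acc = acc + cs.count y := by
  intro fuel
  induction fuel with
  | zero =>
    intro cs acc h
    have : cs = [] := List.length_eq_zero_iff.mp (Nat.le_zero.mp h)
    subst this; simp [PySem.Chars.count.go]
  | succ f ih =>
    intro cs acc h
    match cs with
    | [] => simp [PySem.Chars.count.go]
    | x :: t =>
      rw [PySem.Chars.count.go]
      simp only [List.length_cons] at h
      by_cases hx : x = y
      · subst hx
        rw [if_pos (by simp [List.isPrefixOf])]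
        simp only [List.length, List.drop]
        rw [ih t (acc + 1) (by omega)]
        simp
        omega
      · rw [if_neg (by simp [List.isPrefixOf]; exact fun h' => hx h'.symm)]
        rw [ih t acc (by omega)]
        simp [hx]

theorem pvCount_single (y : Char) (cs : List Char) :
    PySem.Chars.count cs [y] = cs.count y := by
  rw [PySem.Chars.count]
  simp [pvCountGo_single y cs.length cs 0 (le_refl _)]

-- pairs count seen from B's state: previous char as optional head
def pvPairsO (a b : Char) (op : Option Char) (cs : List Char) : Nat :=
  match op with
  | some p => pvPairs a b (p :: cs)
  | none => pvPairs a b cs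

theorem pvFold_invariant (cs : List Char) :
    ∀ (n : Int) (op : Option Char),
      (cs.foldl pvStep (n, op)).1 =
        n + (cs.countP PySem.Chars.isupper : Int) - 2 * (cs.count 'Y' : Int)
          - (pvPairsO 'R' 'n' op cs : Int) - (pvPairsO 'A' 'r' op cs : Int) := by
  induction cs with
  | nil => intro n op; simp [pvPairsO]; cases op <;> simp [pvPairs]
  | cons c t ih =>
    intro n op
    simp only [List.foldl_cons]
    rw [show pvStep (n, op) c =
      ((if PySem.Chars.isupper c then n + 1 else n)
        |> (fun m => if c = 'Y' then m - 2 else m)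
        |> (fun m => if op = some 'R' ∧ c = 'n' then m - 1 else m)
        |> (fun m => if op = some 'A' ∧ c = 'r' then m - 1 else m), some c) from rfl]
    rw [ih]
    have hp : ∀ (a b : Char),
        (pvPairsO a b (some c) t : Int) + (if op = some a ∧ c = b then 1 else 0)
          = pvPairsO a b op (c :: t) := by
      intro a b
      cases op with
      | none => simp [pvPairsO]
      | some p =>
        simp only [pvPairsO, pvPairs]
        by_cases hpc : p = a ∧ c = b
        · simp [hpc]; ring
        · have : ¬ (some p = some a ∧ c = b) := by
            intro ⟨h1, h2⟩; exact hpc ⟨Option.some_injective _ h1, h2⟩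
          simp [hpc]
    rw [← hp 'R' 'n', ← hp 'A' 'r']
    simp only [List.countP_cons, List.count_cons, beq_iff_eq]
    split_ifs <;> push_cast <;> ring

-- ===== VERDICT (by name: the statement is the Claim_ definition above) =====
theorem part_2_spec : Claim_equal_part_2 := by
  intro inp _
  unfold Spec_part_2 part_2 part_2_alt
  simp only [PySem.Str.count]
  rw [PySem.List.foldl_pyRange_zero_pyGetD inp.toList ' '
    (fun (n : Int) (c : Char) => if PySem.Chars.isupper c = true then n + 1 else n) 0]
  rw [PySem.List.foldl_if_add_one]
  rw [pvFold_invariant inp.toList (-1) none]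
  have h1 : ("Rn".toList) = ['R', 'n'] := rfl
  have h2 : ("Ar".toList) = ['A', 'r'] := rfl
  have h3 : ("Y".toList) = ['Y'] := rfl
  rw [h1, h2, h3, pvCount_pair 'R' 'n' (by decide), pvCount_pair 'A' 'r' (by decide),
    pvCount_single 'Y']
  simp only [pvPairsO]
  ring
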